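-- pv_equiv track=rewrite | github.com/joshanashakya/dissertation | workspace/dataset/java-python/GeeksForGeeks/2443/A/2.py | isEqualBlock
-- ===== SOURCE A (Python) =====
-- def isEqualBlock(n):
--
--     # Count same bits in last block
--     first_bit = n % 2
--     first_count = 1
--     n = n // 2
--     while n % 2 == first_bit and n > 0:
--         n = n // 2
--         first_count += 1
--
--     # If n is 0 or it has all 1s,
--     # then it is not considered to
--     # have equal number of 0s and
--     # 1s in blocks.
--     if n == 0:
--         return False
--
--     # Count same bits in all remaining blocks.
--     while n > 0:
--
--         first_bit = n % 2
--         curr_count = 1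
--         n = n // 2
--         while n % 2 == first_bit:
--             n = n // 2
--             curr_count += 1
--
--         if curr_count != first_count:
--             return False
--
--     return True
-- ===== SOURCE B (Python) =====
-- def isEqualBlock(n):
--     # Build-then-verify: extract the bits (LSB first), group them into
--     # consecutive-run lengths in one pass, then check there are at least
--     # two runs and all have the first run's length.
--     bits = []
--     while n > 0:
--         bits.append(n % 2)
--         n //= 2
--     runs = []
--     cnt = 0
--     prev = None
--     for b in bits:
--         if b == prev:
--             cnt += 1
--         else:
--             if prev is not None:
--                 runs.append(cnt)
--             prev = b
--             cnt = 1
--     if prev is not None: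
--         runs.append(cnt)
--     return len(runs) >= 2 and all(r == runs[0] for r in runs)
-- ===== Notes on version B (the rewrite author's own statement) =====
-- stated objective: alternative
-- what changed: B separates the work into a build-then-verify pipeline: it first extracts the bit list, then builds the list of consecutive-run lengths in one pass, and finally checks that there are at least two runs and that all runs equal the first, instead of A's interleaved count-first-block-then-compare-while-consuming loops.
-- outside the precondition, e.g. on isEqualBlock(-5): A returns True, B returns False
import Mathlib
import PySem

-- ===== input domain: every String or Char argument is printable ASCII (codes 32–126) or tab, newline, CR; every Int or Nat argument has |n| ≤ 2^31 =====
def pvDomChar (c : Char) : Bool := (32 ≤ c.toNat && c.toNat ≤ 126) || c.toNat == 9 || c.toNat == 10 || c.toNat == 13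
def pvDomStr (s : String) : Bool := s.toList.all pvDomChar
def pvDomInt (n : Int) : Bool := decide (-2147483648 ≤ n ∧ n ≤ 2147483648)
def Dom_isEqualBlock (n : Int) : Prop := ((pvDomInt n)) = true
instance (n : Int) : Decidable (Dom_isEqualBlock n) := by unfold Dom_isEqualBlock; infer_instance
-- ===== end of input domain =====

-- B re-implements A as a build-then-verify pipeline (extract bits, build run lengths, compare);
-- same cost, different decomposition. Equivalence is claimed on the natural domain 0 ≤ n.

-- termination helper for the halving loops (cited by decreasing_by below)
theorem pvHalfLtToNat {n : Int} (h : 0 < n) : (PySem.Int.floordiv n 2).toNat < n.toNat := by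
  rw [PySem.Int.floordiv_eq_ediv_of_pos (by norm_num)]; omega

-- ===== PORT A =====
-- first while loop: count the bits of the last (lowest) block
def loopA1 (b c n : Int) : Int × Int :=
  if h : PySem.Int.mod n 2 == b ∧ n > 0 then
    loopA1 b (c + 1) (PySem.Int.floordiv n 2)
  else
    (c, n)
termination_by n.toNat
decreasing_by exact pvHalfLtToNat h.2

-- inner while loop (`while n % 2 == first_bit`); fueled: Python's loop has no n > 0 guard,
-- fuel only makes the same computation total (sufficiency proved below)
def loopA2inner : Nat → Int → Int → Int → Int × Int
  | 0, _, curr, n => (curr, n)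
  | fuel + 1, b, curr, n =>
    if PySem.Int.mod n 2 == b then loopA2inner fuel b (curr + 1) (PySem.Int.floordiv n 2)
    else (curr, n)

-- outer while loop over the remaining blocks; fueled totality guard as well
def loopA2 : Nat → Int → Int → Bool
  | 0, _, _ => true
  | fuel + 1, fc, n =>
    if n > 0 then
      let b := PySem.Int.mod n 2
      let r := loopA2inner (n.toNat + 1) b 1 (PySem.Int.floordiv n 2)
      if r.1 ≠ fc then false else loopA2 fuel fc r.2
    else true

def isEqualBlock (n : Int) : Bool :=
  let first_bit := PySem.Int.mod n 2
  let r := loopA1 first_bit 1 (PySem.Int.floordiv n 2)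
  if r.2 = 0 then false
  else loopA2 (r.2.toNat + 1) r.1 r.2

-- ===== PORT B =====
-- while n > 0: bits.append(n % 2); n //= 2
def bitsB (n : Int) (acc : List Int) : List Int :=
  if h : n > 0 then bitsB (PySem.Int.floordiv n 2) (acc ++ [PySem.Int.mod n 2])
  else acc
termination_by n.toNat
decreasing_by exact pvHalfLtToNat h

-- body of the for-loop over bits: state (runs, cnt, prev)
def stepB (st : List Int × Int × Option Int) (b : Int) : List Int × Int × Option Int :=
  if some b = st.2.2 then (st.1, st.2.1 + 1, st.2.2)
  else
    match st.2.2 with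
    | none => (st.1, 1, some b)
    | some _ => (st.1 ++ [st.2.1], 1, some b)

def isEqualBlock_alt (n : Int) : Bool :=
  let bits := bitsB n []
  let st := bits.foldl stepB ([], 0, none)
  let runs := match st.2.2 with
    | none => st.1
    | some _ => st.1 ++ [st.2.1]
  decide (runs.length ≥ 2) && runs.all (fun r => r == runs.headD 0)

-- ===== PRECONDITION & SPEC =====
-- Pre_ restricts to the task's natural domain (bit blocks of a nonnegative integer):
-- on negative n none of A's loops ever run and A returns True while B returns False,
-- and neither value is specified for a negative input.
def Pre_isEqualBlock (n : Int) : Prop := 0 ≤ n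
instance (n : Int) : Decidable (Pre_isEqualBlock n) := by unfold Pre_isEqualBlock; infer_instance

def pvWitness_isEqualBlock : Int := (10)

def Spec_isEqualBlock (n : Int) (out : Bool) : Prop := out = isEqualBlock_alt n
instance (n : Int) (out : Bool) : Decidable (Spec_isEqualBlock n out) := by unfold Spec_isEqualBlock; infer_instance

-- ===== CLAIM (what is proved, stated in full; the proofs are below) =====
def Claim_equal_isEqualBlock : Prop := ∀ (n : Int), Dom_isEqualBlock n → Pre_isEqualBlock n → Spec_isEqualBlock n (isEqualBlock n)

-- ===== LEMMAS AND PROOFS =====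

-- reference bit list (LSB first) and run-length grouping, used only by the proofs
def bitsOf (n : Int) : List Int :=
  if h : 0 < n then PySem.Int.mod n 2 :: bitsOf (PySem.Int.floordiv n 2) else []
termination_by n.toNat
decreasing_by exact pvHalfLtToNat h

def runsFrom (p c : Int) : List Int → List Int
  | [] => [c]
  | b :: t => if b = p then runsFrom p (c + 1) t else c :: runsFrom b 1 t

def runsOf : List Int → List Int
  | [] => []
  | b :: t => runsFrom b 1 t

def checkRuns (rs : List Int) : Bool :=
  decide (rs.length ≥ 2) && rs.all (fun r => r == rs.headD 0)

theorem bitsOf_pos {n : Int} (h : 0 < n) :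
    bitsOf n = PySem.Int.mod n 2 :: bitsOf (PySem.Int.floordiv n 2) := by
  rw [bitsOf]; simp [h]

theorem bitsOf_nonpos {n : Int} (h : ¬ 0 < n) : bitsOf n = [] := by
  rw [bitsOf]; simp [h]

theorem mod2_cases (n : Int) : PySem.Int.mod n 2 = 0 ∨ PySem.Int.mod n 2 = 1 := by
  rw [PySem.Int.mod_eq_emod_of_pos (by norm_num)]; omega

theorem floordiv2_nonneg {n : Int} (h : 0 ≤ n) : 0 ≤ PySem.Int.floordiv n 2 := by
  rw [PySem.Int.floordiv_eq_ediv_of_pos (by norm_num)]; omega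

theorem floordiv2_le {n : Int} (h : 0 ≤ n) : PySem.Int.floordiv n 2 ≤ n := by
  rw [PySem.Int.floordiv_eq_ediv_of_pos (by norm_num)]; omega

theorem bitsOf_eq_nil_iff {n : Int} (h : 0 ≤ n) : bitsOf n = [] ↔ n = 0 := by
  by_cases hp : 0 < n
  · rw [bitsOf_pos hp]; simp; omega
  · rw [bitsOf_nonpos hp]; simp; omega

theorem length_bitsOf_le : ∀ (k : Nat) (n : Int), 0 ≤ n → n.toNat ≤ k → (bitsOf n).length ≤ n.toNat := by
  intro k
  induction k with
  | zero =>
    intro n hn hk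
    have : n = 0 := by omega
    subst this
    rw [bitsOf_nonpos (by omega)]; simp
  | succ k ih =>
    intro n hn hk
    by_cases hp : 0 < n
    · rw [bitsOf_pos hp]
      have h1 := floordiv2_nonneg hn
      have h2 := pvHalfLtToNat hp
      have := ih _ h1 (by omega)
      simp only [List.length_cons]
      have h3 : (PySem.Int.floordiv n 2).toNat + 1 ≤ n.toNat := by
        have := PySem.Int.floordiv_eq_ediv_of_pos (a := n) (b := 2) (by norm_num)
        omega
      omega
    · rw [bitsOf_nonpos hp]; simp

theorem exists_one_bit : ∀ (k : Nat) (n : Int), 0 < n → n.toNat ≤ k → ∃ x ∈ bitsOf n, x = 1 := by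
  intro k
  induction k with
  | zero => intro n hn hk; omega
  | succ k ih =>
    intro n hn hk
    rw [bitsOf_pos hn]
    rcases mod2_cases n with h0 | h1
    · have hev : 0 < PySem.Int.floordiv n 2 := by
        have := PySem.Int.floordiv_eq_ediv_of_pos (a := n) (b := 2) (by norm_num)
        have := PySem.Int.mod_eq_emod_of_pos (a := n) (b := 2) (by norm_num)
        omega
      have hk' : (PySem.Int.floordiv n 2).toNat ≤ k := by
        have := pvHalfLtToNat hn; omega
      obtain ⟨x, hx, hx1⟩ := ih _ hev hk'
      exact ⟨x, List.mem_cons_of_mem _ hx, hx1⟩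
    · exact ⟨PySem.Int.mod n 2, List.mem_cons_self .., h1⟩

theorem loopA1_spec : ∀ (k : Nat) (b c n : Int), 0 ≤ n → n.toNat ≤ k →
    (loopA1 b c n).1 = c + (((bitsOf n).takeWhile (fun x => x == b)).length : Int) ∧
    0 ≤ (loopA1 b c n).2 ∧
    bitsOf (loopA1 b c n).2 = (bitsOf n).dropWhile (fun x => x == b) := by
  intro k
  induction k with
  | zero =>
    intro b c n hn hk
    have : n = 0 := by omega
    subst this
    rw [loopA1]
    simp [bitsOf_nonpos (by omega : ¬ (0:Int) < 0)]
  | succ k ih =>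
    intro b c n hn hk
    rw [loopA1]
    by_cases hc : PySem.Int.mod n 2 == b ∧ n > 0
    · rw [dif_pos hc]
      have h1 := floordiv2_nonneg hn
      have hk' : (PySem.Int.floordiv n 2).toNat ≤ k := by
        have := pvHalfLtToNat hc.2; omega
      obtain ⟨ih1, ih2, ih3⟩ := ih b (c + 1) _ h1 hk'
      rw [bitsOf_pos hc.2]
      refine ⟨?_, ih2, ?_⟩
      · rw [List.takeWhile_cons, if_pos hc.1]
        simp only [List.length_cons] at *
        push_cast
        omega
      · rw [ih3, List.dropWhile_cons, if_pos hc.1]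
    · rw [dif_neg hc]
      by_cases hp : 0 < n
      · have hb : (PySem.Int.mod n 2 == b) = false := by
          simp only [beq_eq_false_iff_ne, ne_eq]
          intro hx
          rw [PySem.Int.mod_eq_emod_of_pos (by norm_num)] at hx
          exact hc ⟨by simp [hx], hp⟩
        rw [bitsOf_pos hp]
        rw [List.takeWhile_cons, List.dropWhile_cons]
        refine ⟨?_, hn, ?_⟩
        · simp only [hb, Bool.false_eq_true, if_false, List.length_nil, Nat.cast_zero, add_zero]
        · simp only [hb, Bool.false_eq_true, if_false]
      · have : n = 0 := by omega
        subst this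
        simp [bitsOf_nonpos (by omega : ¬ (0:Int) < 0)]

theorem loopA2inner_spec : ∀ (fuel : Nat) (b curr n : Int), 0 ≤ n →
    ((bitsOf n).takeWhile (fun x => x == b)).length < fuel →
    (b = 1 ∨ (bitsOf n).dropWhile (fun x => x == b) ≠ []) →
    (loopA2inner fuel b curr n).1 = curr + (((bitsOf n).takeWhile (fun x => x == b)).length : Int) ∧
    0 ≤ (loopA2inner fuel b curr n).2 ∧
    (loopA2inner fuel b curr n).2 ≤ n ∧
    bitsOf (loopA2inner fuel b curr n).2 = (bitsOf n).dropWhile (fun x => x == b) := by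
  intro fuel
  induction fuel with
  | zero => intro b curr n _ hlt _; omega
  | succ fuel ih =>
    intro b curr n hn hlt hterm
    rw [loopA2inner]
    by_cases hc : PySem.Int.mod n 2 == b
    · rw [if_pos hc]
      by_cases hp : 0 < n
      · have h1 := floordiv2_nonneg hn
        rw [bitsOf_pos hp] at hlt hterm ⊢
        rw [List.takeWhile_cons, if_pos hc] at hlt ⊢
        rw [List.dropWhile_cons, if_pos hc] at hterm ⊢
        simp only [List.length_cons] at hlt
        obtain ⟨ih1, ih2, ih3, ih4⟩ :=
          ih b (curr + 1) (PySem.Int.floordiv n 2) h1 (by omega) hterm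
        refine ⟨?_, ih2, ?_, ih4⟩
        · rw [ih1]; simp only [List.length_cons]; push_cast; ring
        · exact le_trans ih3 (floordiv2_le hn)
      · have hz : n = 0 := by omega
        subst hz
        exfalso
        rw [bitsOf_nonpos (by omega : ¬ (0:Int) < 0)] at hterm
        simp at hterm
        have h0 : PySem.Int.mod 0 2 = 0 := by
          rw [PySem.Int.mod_eq_emod_of_pos (by norm_num)]; decide
        rw [h0, hterm] at hc
        simp at hc
    · rw [if_neg hc]
      by_cases hp : 0 < n
      · rw [bitsOf_pos hp]
        rw [List.takeWhile_cons, if_neg hc, List.dropWhile_cons, if_neg hc]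
        exact ⟨by simp, hn, le_refl n, rfl⟩
      · have hz : n = 0 := by omega
        subst hz
        simp [bitsOf_nonpos (by omega : ¬ (0:Int) < 0)]


theorem runsFrom_ne_nil : ∀ (l : List Int) (p c : Int), runsFrom p c l ≠ [] := by
  intro l
  induction l with
  | nil => intro p c; simp [runsFrom]
  | cons b t ih =>
    intro p c
    rw [runsFrom]
    split_ifs with h
    · exact ih p (c + 1)
    · simp

theorem runsFrom_eq : ∀ (l : List Int) (p c : Int),
    runsFrom p c l =
      (c + ((l.takeWhile (fun x => x == p)).length : Int)) ::
        runsOf (l.dropWhile (fun x => x == p)) := by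
  intro l
  induction l with
  | nil => intro p c; simp [runsFrom, runsOf]
  | cons b t ih =>
    intro p c
    rw [runsFrom]
    by_cases h : b = p
    · rw [if_pos h, ih p (c + 1), List.takeWhile_cons, List.dropWhile_cons]
      have hb : (b == p) = true := by simp [h]
      rw [hb]
      simp only [if_true, List.length_cons]
      push_cast
      ring_nf
    · rw [if_neg h, List.takeWhile_cons, List.dropWhile_cons]
      have hb : (b == p) = false := by simp [h]
      rw [hb]
      simp [runsOf]

theorem loopA2_spec : ∀ (fuel : Nat) (fc n : Int), 0 ≤ n → n.toNat < fuel →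
    loopA2 fuel fc n = (runsOf (bitsOf n)).all (fun r => r == fc) := by
  intro fuel
  induction fuel with
  | zero => intro fc n _ h; omega
  | succ fuel ih =>
    intro fc n hn hk
    by_cases hp : n > 0
    · have h1 : 0 ≤ PySem.Int.floordiv n 2 := floordiv2_nonneg hn
      have hhalf := pvHalfLtToNat hp
      have hlen : ((bitsOf (PySem.Int.floordiv n 2)).takeWhile
          (fun x => x == PySem.Int.mod n 2)).length < n.toNat + 1 := by
        have hL := length_bitsOf_le (PySem.Int.floordiv n 2).toNat (PySem.Int.floordiv n 2) h1 (le_refl _)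
        have hT := List.Sublist.length_le
          (List.takeWhile_sublist (l := bitsOf (PySem.Int.floordiv n 2))
            (fun x => x == PySem.Int.mod n 2))
        omega
      have hterm : PySem.Int.mod n 2 = 1 ∨
          (bitsOf (PySem.Int.floordiv n 2)).dropWhile (fun x => x == PySem.Int.mod n 2) ≠ [] := by
        rcases mod2_cases n with h0 | h1'
        · right
          have hev : 0 < PySem.Int.floordiv n 2 := by
            have := PySem.Int.floordiv_eq_ediv_of_pos (a := n) (b := 2) (by norm_num)
            have := PySem.Int.mod_eq_emod_of_pos (a := n) (b := 2) (by norm_num)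
            omega
          obtain ⟨x, hx, hx1⟩ := exists_one_bit (PySem.Int.floordiv n 2).toNat _ hev (le_refl _)
          intro hnil
          rw [List.dropWhile_eq_nil_iff] at hnil
          have := hnil x hx
          rw [hx1, h0] at this
          simp at this
        · exact Or.inl h1'
      obtain ⟨i1, i2, i3, i4⟩ := loopA2inner_spec (n.toNat + 1) (PySem.Int.mod n 2) 1
        (PySem.Int.floordiv n 2) h1 hlen hterm
      simp only [loopA2]
      rw [if_pos hp]
      set r := loopA2inner (n.toNat + 1) (PySem.Int.mod n 2) 1 (PySem.Int.floordiv n 2) with hr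
      have hruns : runsOf (bitsOf n) = r.1 :: runsOf (bitsOf r.2) := by
        rw [bitsOf_pos hp]
        show runsFrom (PySem.Int.mod n 2) 1 (bitsOf (PySem.Int.floordiv n 2)) = _
        rw [runsFrom_eq, ← i4, ← i1]
      rw [hruns, List.all_cons]
      by_cases hfc : r.1 = fc
      · rw [if_neg (by simp [hfc])]
        have hlt : r.2.toNat < fuel := by omega
        rw [ih fc r.2 i2 hlt]
        simp [hfc]
      · rw [if_pos hfc]
        have : (r.1 == fc) = false := by simp [hfc]
        rw [this, Bool.false_and]
    · simp only [loopA2]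
      rw [if_neg hp]
      have h0 : n = 0 := by omega
      subst h0
      rw [bitsOf_nonpos (by omega : ¬ (0:Int) < 0)]
      simp [runsOf]

theorem A_eq (n : Int) (hn : 0 ≤ n) : isEqualBlock n = checkRuns (runsOf (bitsOf n)) := by
  simp only [isEqualBlock]
  by_cases hp : 0 < n
  · have h1 : 0 ≤ PySem.Int.floordiv n 2 := floordiv2_nonneg hn
    obtain ⟨a1, a2, a3⟩ := loopA1_spec (PySem.Int.floordiv n 2).toNat (PySem.Int.mod n 2) 1
      (PySem.Int.floordiv n 2) h1 (le_refl _)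
    set r := loopA1 (PySem.Int.mod n 2) 1 (PySem.Int.floordiv n 2) with hr
    have hruns : runsOf (bitsOf n) = r.1 :: runsOf (bitsOf r.2) := by
      rw [bitsOf_pos hp]
      show runsFrom (PySem.Int.mod n 2) 1 (bitsOf (PySem.Int.floordiv n 2)) = _
      rw [runsFrom_eq, ← a3, ← a1]
    by_cases hz : r.2 = 0
    · rw [if_pos hz]
      have hbz : bitsOf r.2 = [] := by rw [hz]; exact bitsOf_nonpos (by omega)
      rw [hruns, hbz]
      simp [checkRuns, runsOf]
    · rw [if_neg hz]
      rw [loopA2_spec (r.2.toNat + 1) r.1 r.2 a2 (by omega)]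
      rw [hruns]
      have hne : runsOf (bitsOf r.2) ≠ [] := by
        cases hbb : bitsOf r.2 with
        | nil => exact absurd ((bitsOf_eq_nil_iff a2).mp hbb) hz
        | cons x xs => simp only [runsOf]; exact runsFrom_ne_nil xs x 1
      cases hre : runsOf (bitsOf r.2) with
      | nil => exact absurd hre hne
      | cons y ys =>
        simp [checkRuns, List.all_cons]
  · have h0 : n = 0 := by omega
    subst h0
    have hf : PySem.Int.floordiv 0 2 = 0 := by
      rw [PySem.Int.floordiv_eq_ediv_of_pos (by norm_num)]
      norm_num
    rw [hf, loopA1]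
    have hcond : ¬ ((PySem.Int.mod 0 2 == PySem.Int.mod 0 2) = true ∧ (0:Int) > 0) := by
      intro h
      exact absurd h.2 (by omega)
    rw [dif_neg hcond]
    rw [bitsOf_nonpos (by omega : ¬ (0:Int) < 0)]
    simp [checkRuns, runsOf]

theorem bitsB_eq : ∀ (k : Nat) (n : Int) (acc : List Int), n.toNat ≤ k →
    bitsB n acc = acc ++ bitsOf n := by
  intro k
  induction k with
  | zero =>
    intro n acc h
    rw [bitsB]
    have hp : ¬ n > 0 := by omega
    rw [dif_neg hp, bitsOf_nonpos hp]
    simp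
  | succ k ih =>
    intro n acc h
    rw [bitsB]
    by_cases hp : n > 0
    · have hk : (PySem.Int.floordiv n 2).toNat ≤ k := by
        have := pvHalfLtToNat hp; omega
      rw [dif_pos hp, ih _ _ hk, bitsOf_pos hp]
      simp
    · rw [dif_neg hp, bitsOf_nonpos hp]
      simp

theorem foldB_some : ∀ (l runs : List Int) (c p : Int),
    ∃ runs' c' p', l.foldl stepB (runs, c, some p) = (runs', c', some p') ∧
      runs' ++ [c'] = runs ++ runsFrom p c l := by
  intro l
  induction l with
  | nil => intro runs c p; exact ⟨runs, c, p, rfl, by simp [runsFrom]⟩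
  | cons b t ih =>
    intro runs c p
    rw [List.foldl_cons]
    by_cases h : b = p
    · have hs : stepB (runs, c, some p) b = (runs, c + 1, some p) := by
        simp [stepB, h]
      rw [hs]
      obtain ⟨r', c', p', he, hv⟩ := ih runs (c + 1) p
      exact ⟨r', c', p', he, by rw [hv]; simp [runsFrom, h]⟩
    · have hs : stepB (runs, c, some p) b = (runs ++ [c], 1, some b) := by
        simp [stepB, h]
      rw [hs]
      obtain ⟨r', c', p', he, hv⟩ := ih (runs ++ [c]) 1 b
      refine ⟨r', c', p', he, ?_⟩
      rw [hv]
      simp [runsFrom, h]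

theorem alt_eq (n : Int) (hn : 0 ≤ n) : isEqualBlock_alt n = checkRuns (runsOf (bitsOf n)) := by
  have hbits : bitsB n [] = bitsOf n := by
    rw [bitsB_eq n.toNat n [] (le_refl _)]
    simp
  show checkRuns
      (match (List.foldl stepB ([], 0, none) (bitsB n [])).2.2 with
        | none => (List.foldl stepB ([], 0, none) (bitsB n [])).1
        | some _ =>
          (List.foldl stepB ([], 0, none) (bitsB n [])).1 ++
            [(List.foldl stepB ([], 0, none) (bitsB n [])).2.1]) =
    checkRuns (runsOf (bitsOf n))
  apply congrArg checkRuns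
  rw [hbits]
  cases hb : bitsOf n with
  | nil => simp [runsOf]
  | cons b t =>
    rw [List.foldl_cons]
    have hs : stepB ([], 0, none) b = ([], 1, some b) := by simp [stepB]
    rw [hs]
    obtain ⟨r', c', p', he, hv⟩ := foldB_some t [] 1 b
    rw [he]
    simpa [runsOf] using hv

-- ===== VERDICT (by name: the statement is the Claim_ definition above) =====
theorem isEqualBlock_spec : Claim_equal_isEqualBlock := by
  intro n _ hpre
  show isEqualBlock n = isEqualBlock_alt n
  rw [A_eq n hpre, alt_eq n hpre]
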